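-- pv_equiv track=rewrite | github.com/shriya/rithm-online-coursework | 13-py-one/1-python-lists/shift.py | shifted_diff
-- ===== SOURCE A (Python) =====
-- def shifted_diff(first, second):
--     first_list = list(first)
--
--     def rotate(l, n):
--         return l[-n:] + l[:-n]
--
--     num = -1
--
--     for i in range(0, len(first_list)):
--     	rotated = ''.join(rotate(first_list, i))
--     	if rotated == second:
--     		num = i
--
--     return num
-- ===== SOURCE B (Python) =====
-- def shifted_diff(first, second):
--     # Largest rotation amount turning `first` into `second`, else -1.
--     # One substring search in first+first instead of building every rotation:
--     # rotating right by i (0 < i < n) matches iff second occurs at index n-i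
--     # in first+first, so the largest i corresponds to the SMALLEST start >= 1.
--     n = len(first)
--     if n == 0 or len(second) != n:
--         return -1
--     s = (first + first).find(second, 1)
--     if 1 <= s < n:
--         return n - s
--     return 0 if first == second else -1
-- ===== Notes on version B (the rewrite author's own statement) =====
-- stated objective: faster
-- what changed: Instead of building and joining every rotation and remembering the last match (O(n^2)), B runs one C-level substring search for `second` in `first+first` starting at index 1 and converts the first (smallest) match position s into the largest rotation amount n-s, falling back to 0 when first == second.
import Mathlib
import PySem

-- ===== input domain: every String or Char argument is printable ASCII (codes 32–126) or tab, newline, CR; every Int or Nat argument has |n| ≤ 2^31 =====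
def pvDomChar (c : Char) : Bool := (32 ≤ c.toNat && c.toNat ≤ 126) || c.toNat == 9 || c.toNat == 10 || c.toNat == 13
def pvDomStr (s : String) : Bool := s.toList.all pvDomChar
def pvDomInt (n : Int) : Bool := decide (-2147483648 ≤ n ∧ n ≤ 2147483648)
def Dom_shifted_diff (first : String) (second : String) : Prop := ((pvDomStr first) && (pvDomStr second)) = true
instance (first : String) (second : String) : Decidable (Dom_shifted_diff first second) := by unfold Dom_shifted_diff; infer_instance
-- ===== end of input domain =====

-- B replaces A's build-every-rotation loop by one substring search in first+first
-- (smallest match offset ≥ 1 ↦ largest rotation amount); proved to return the same value.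


-- ===== PORT A =====
-- A's inner helper `rotate`: l[-n:] + l[:-n]
def pyRotate (l : List Char) (n : Int) : List Char :=
  PySem.List.slice l (some (-n)) none ++ PySem.List.slice l none (some (-n))

def shifted_diff (first : String) (second : String) : Int :=
  let first_list := first.toList
  (PySem.List.pyRange 0 (first_list.length : Int)).foldl
    (fun num i => if String.ofList (pyRotate first_list i) = second then i else num) (-1)

-- ===== PORT B =====
def shifted_diff_alt (first : String) (second : String) : Int :=
  let n : Int := PySem.Str.len first
  if n = 0 ∨ PySem.Str.len second ≠ n then -1
  else
    let s := PySem.Str.findFrom (first ++ first) second 1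
    if 1 ≤ s ∧ s < n then n - s
    else if first = second then 0 else -1

-- ===== PRECONDITION & SPEC =====
def Spec_shifted_diff (first : String) (second : String) (out : Int) : Prop := out = shifted_diff_alt first second
instance (first : String) (second : String) (out : Int) : Decidable (Spec_shifted_diff first second out) := by unfold Spec_shifted_diff; infer_instance

-- ===== CLAIM (what is proved, stated in full; the proofs are below) =====
def Claim_equal_shifted_diff : Prop := ∀ (first : String) (second : String), Dom_shifted_diff first second → Spec_shifted_diff first second (shifted_diff first second)

-- ===== LEMMAS AND PROOFS =====

-- A's loop keeps the LAST matching rotation amount; this is its explicit recursion.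
def lastRot (first second : String) : Nat → Int
  | 0 => -1
  | m+1 => if String.ofList (pyRotate first.toList (m : Int)) = second then (m : Int) else lastRot first second m

theorem foldl_eq_lastRot (first second : String) (m : Nat) :
    (PySem.List.pyRange 0 (m : Int)).foldl
      (fun num i => if String.ofList (pyRotate first.toList i) = second then i else num) (-1)
    = lastRot first second m := by
  induction m with
  | zero => simp [lastRot]
  | succ m ih =>
    have h : ((m : Int) + 1) = ((m + 1 : Nat) : Int) := by push_cast; ring
    rw [← h, PySem.List.pyRange_one_succ_right (by positivity), List.foldl_append]
    simp only [List.foldl_cons, List.foldl_nil, ih, lastRot]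

theorem lastRot_eq_neg_one (first second : String) (m : Nat)
    (h : ∀ i < m, ¬ String.ofList (pyRotate first.toList (i : Int)) = second) :
    lastRot first second m = -1 := by
  induction m with
  | zero => rfl
  | succ m ih =>
    unfold lastRot
    rw [if_neg (h m (by omega))]
    exact ih fun i hi => h i (by omega)

theorem lastRot_eq_of_max (first second : String) (j m : Nat) (hjm : j < m)
    (hQ : String.ofList (pyRotate first.toList (j : Int)) = second)
    (hmax : ∀ i, j < i → i < m → ¬ String.ofList (pyRotate first.toList (i : Int)) = second) :
    lastRot first second m = (j : Int) := by
  induction m with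
  | zero => omega
  | succ m ih =>
    unfold lastRot
    by_cases hj : j = m
    · subst hj; rw [if_pos hQ]
    · rw [if_neg (hmax m (by omega) (by omega))]
      exact ih (by omega) fun i hi1 hi2 => hmax i hi1 (by omega)

theorem ofList_eq_iff (a : List Char) (s : String) : String.ofList a = s ↔ a = s.toList := by
  constructor
  · intro h; rw [← h]; simp
  · intro h; rw [h]; simp

theorem pyRotate_eq (fl : List Char) (i : Nat) (h : i ≤ fl.length) :
    pyRotate fl (i : Int) = fl.drop (fl.length - i) ++ fl.take (fl.length - i) := by
  rcases Nat.eq_zero_or_pos i with hi | hi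
  · subst hi
    unfold pyRotate
    rw [show (-((0 : Nat) : Int)) = ((0 : Nat) : Int) by simp,
      PySem.List.slice_from_natCast, PySem.List.slice_to_natCast]
    simp
  · unfold pyRotate
    rw [PySem.List.slice_from_neg_natCast fl i hi, PySem.List.slice_to_neg_natCast fl i hi]

theorem prefix_drop_iff (fl sl : List Char) (s : Nat) (hs : s ≤ fl.length)
    (hlen : sl.length = fl.length) :
    sl <+: (fl ++ fl).drop s ↔ sl = fl.drop s ++ fl.take s := by
  rw [List.drop_append_of_le_length hs, List.prefix_iff_eq_take, hlen, List.take_append,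
    List.take_of_length_le (by simp), List.length_drop,
    show fl.length - (fl.length - s) = s by omega]

-- rotation by i matches `second` ↔ `second.toList` occurs at offset (n - i) in fl ++ fl
theorem rot_match_iff (fl : List Char) (second : String) (i : Nat) (hi : i ≤ fl.length)
    (hlen : second.toList.length = fl.length) :
    String.ofList (pyRotate fl (i : Int)) = second ↔
      second.toList <+: (fl ++ fl).drop (fl.length - i) := by
  rw [ofList_eq_iff, pyRotate_eq fl i hi, prefix_drop_iff fl second.toList _ (by omega) hlen]
  exact eq_comm

theorem match_len_le (fl sl : List Char) (s : Nat) (hpos : 0 < fl.length) (hlen : sl.length = fl.length)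
    (h : sl <+: (fl ++ fl).drop s) : s ≤ fl.length := by
  have := h.length_le
  simp [List.length_drop] at this
  omega

-- ===== VERDICT (by name: the statement is the Claim_ definition above) =====
theorem shifted_diff_spec : Claim_equal_shifted_diff := by
  intro first second _
  unfold Spec_shifted_diff shifted_diff shifted_diff_alt
  simp only [PySem.Str.len_eq, PySem.Str.findFrom_eq, String.toList_append]
  rw [foldl_eq_lastRot]
  set fl := first.toList with hfl
  set sl := second.toList with hsl
  set n := fl.length with hn
  by_cases hn0 : n = 0
  · rw [if_pos (Or.inl (by exact_mod_cast hn0)), hn0]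
    rfl
  · by_cases hlen : sl.length = n
    · rw [if_neg (by push_cast [hlen]; omega)]
      have h2n : 1 ≤ (fl ++ fl).length := by rw [List.length_append]; omega
      by_cases hFneg : PySem.Chars.findFrom (fl ++ fl) sl 1 = -1
      · -- no occurrence at offset ≥ 1: no rotation matches at all
        have hiff := PySem.Chars.findFrom_natCast_eq_neg_one_iff (fl ++ fl) sl 1 h2n
        simp only [Nat.cast_one] at hiff
        have hno : ¬ sl <:+: (fl ++ fl).drop 1 := hiff.mp hFneg
        have hnos : ∀ s : Nat, 1 ≤ s → ¬ sl <+: (fl ++ fl).drop s := by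
          intro s hs hpre
          have hdd : (fl ++ fl).drop s = ((fl ++ fl).drop 1).drop (s - 1) := by
            rw [List.drop_drop]; congr 1; omega
          refine hno (hpre.isInfix.trans ?_)
          rw [hdd]
          exact (List.drop_suffix _ _).isInfix
        rw [lastRot_eq_neg_one first second n (by
          intro i hi hQ
          exact hnos (n - i) (by omega) ((rot_match_iff fl second i (by omega) hlen).mp hQ))]
        rw [hFneg, if_neg (by simp)]
        rw [if_neg (by
          intro hfs
          rw [String.ext_iff, ← hfl, ← hsl] at hfs
          refine hnos n (by omega) ?_
          rw [List.drop_left, hfs])]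
      · -- a first occurrence s ∈ [1, n]
        have hspec := PySem.Chars.findFrom_natCast_spec (fl ++ fl) sl 1 h2n
        simp only [Nat.cast_one] at hspec
        obtain ⟨hF1, hpre, hmin⟩ := hspec hFneg
        set s := (PySem.Chars.findFrom (fl ++ fl) sl 1).toNat with hsdef
        have hFs : PySem.Chars.findFrom (fl ++ fl) sl 1 = (s : Int) := by
          rw [hsdef, Int.toNat_of_nonneg (le_trans (by norm_num) hF1)]
        rw [hFs] at hF1 ⊢
        have hs1 : 1 ≤ s := by exact_mod_cast hF1
        have hsn : s ≤ n := match_len_le fl sl s (by omega) hlen hpre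
        by_cases hsltn : s < n
        · -- B returns n - s; A's largest matching rotation amount is n - s
          rw [lastRot_eq_of_max first second (n - s) n (by omega)
            ((rot_match_iff fl second (n - s) (by omega) hlen).mpr
              (by rw [show n - (n - s) = s by omega]; exact hpre))
            (by
              intro i hi1 hi2 hQ
              exact hmin (n - i) (by omega) (by omega)
                ((rot_match_iff fl second i (by omega) hlen).mp hQ))]
          rw [if_pos ⟨by exact_mod_cast hs1, by exact_mod_cast hsltn⟩]
          omega
        · -- s = n : first = second, both return 0
          have hfs : fl = sl := by
            have hp : sl <+: fl := by
              have h' := hpre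
              rw [show s = n from by omega, List.drop_left] at h'
              exact h'
            exact (hp.eq_of_length (by omega)).symm
          rw [lastRot_eq_of_max first second 0 n (by omega)
            ((rot_match_iff fl second 0 (by omega) hlen).mpr
              (by rw [Nat.sub_zero, List.drop_left, hfs]))
            (by
              intro i hi1 hi2 hQ
              exact hmin (n - i) (by omega) (by omega)
                ((rot_match_iff fl second i (by omega) hlen).mp hQ))]
          rw [if_neg (by omega),
            if_pos (by rw [String.ext_iff, ← hfl, ← hsl]; exact hfs)]
          norm_num
    · -- lengths differ: no rotation can equal second, both return -1
      rw [if_pos (Or.inr (by omega)), lastRot_eq_neg_one]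
      intro i hi hQ
      rw [ofList_eq_iff] at hQ
      apply hlen
      have hrl : (pyRotate first.toList (i : Int)).length = n := by
        rw [pyRotate_eq first.toList i (by rw [← hfl]; omega)]
        rw [← hfl]
        simp
        omega
      rw [hsl, ← hQ, hrl]
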